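-- pv_equiv track=rewrite | github.com/cutehammond772/problem-solving-archive | 백준/Platinum/14227. 빨간 버튼 파란 버튼/빨간 버튼 파란 버튼.py | solve
-- ===== SOURCE A (Python) =====
-- INF = 10 ** 9 + 1
--
-- def solve(A, B, C, D):
--   # 2를 곱한 횟수
--   P = 0
--
--   # 결과
--   result = INF
--
--   # 목표 숫자를 넘는 순간 성립 X
--   while A <= C and B <= D:
--     # 차이가 동일한 경우, +1 연산만 따지기
--     if C - A == D - B:
--       Q, R = 0, C - A
--
--       for x in range(P, -1, -1):
--         Q += R // (2 ** x)
--         R %= (2 ** x)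
--
--       result = min(result, P + Q)
--
--     # 차이가 같아질 때까지 2 곱하기
--     A *= 2
--     B *= 2
--     P += 1
--
--   return -1 if result == INF else result
-- ===== SOURCE B (Python) =====
-- INF = 10 ** 9 + 1
--
-- def solve(A, B, C, D):
--   P = 0
--   result = INF
--   while A <= C and B <= D:
--     if C - A == D - B:
--       R = C - A
--       # closed form: presses = high part above 2^P plus popcount of the low P bits
--       Q = (R >> P) + (R & ((1 << P) - 1)).bit_count()
--       result = min(result, P + Q)
--     A *= 2
--     B *= 2
--     P += 1
--   return -1 if result == INF else result
-- ===== Notes on version B (the rewrite author's own statement) =====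
-- stated objective: simpler
-- what changed: The inner greedy division loop over x in range(P,-1,-1) (repeated floordiv/mod by 2**x) is replaced by the closed form (R >> P) + popcount(R & ((1<<P)-1)); the doubling outer loop is kept.
import Mathlib
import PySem

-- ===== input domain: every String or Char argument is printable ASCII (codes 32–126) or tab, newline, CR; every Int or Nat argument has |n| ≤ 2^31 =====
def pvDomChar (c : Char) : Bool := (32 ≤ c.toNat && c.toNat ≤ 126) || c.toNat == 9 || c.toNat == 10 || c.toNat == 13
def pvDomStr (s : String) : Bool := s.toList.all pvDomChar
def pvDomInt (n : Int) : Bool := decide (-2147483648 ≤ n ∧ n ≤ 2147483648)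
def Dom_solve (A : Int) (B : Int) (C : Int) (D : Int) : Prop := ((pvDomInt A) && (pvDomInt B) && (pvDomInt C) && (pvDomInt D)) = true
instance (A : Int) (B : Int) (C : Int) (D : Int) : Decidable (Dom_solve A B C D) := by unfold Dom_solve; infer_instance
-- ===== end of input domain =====

-- B replaces A's inner greedy division loop by the closed form (R >> P) + popcount(R & ((1<<P)-1)); objective: simpler.

-- ===== PORT A =====
def pvINF : Int := 10 ^ 9 + 1

-- the inner 'for x in range(P, -1, -1): Q += R // 2**x; R %= 2**x' loop, state (Q, R)
def solveInner (P : Int) (R : Int) : Int × Int :=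
  (PySem.List.pyRange P (-1) (-1)).foldl
    (fun qr x => (qr.1 + PySem.Int.floordiv qr.2 ((2 : Int) ^ x.toNat),
                  PySem.Int.mod qr.2 ((2 : Int) ^ x.toNat)))
    (0, R)

-- the 'while A <= C and B <= D' loop; fuel only makes it total (whenever the Python loop
-- terminates on an input admitted by Dom_solve it runs < 40 iterations, so fuel 128 is ample)
def solveLoop (fuel : Nat) (A B C D P result : Int) : Int :=
  match fuel with
  | 0 => result
  | Nat.succ f =>
    if A ≤ C ∧ B ≤ D then
      let result := if C - A = D - B then min result (P + (solveInner P (C - A)).1) else result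
      solveLoop f (A * 2) (B * 2) C D (P + 1) result
    else result

def solve (A : Int) (B : Int) (C : Int) (D : Int) : Int :=
  let r := solveLoop 128 A B C D 0 pvINF
  if r = pvINF then -1 else r

-- ===== PORT B =====
-- same while-loop shape as Source B, closed-form inner step; P stays ≥ 0 in every reachable
-- state, where 'P.toNat' makes Python's 'R >> P' / '1 << P' exact
def solveLoopAlt (fuel : Nat) (A B C D P result : Int) : Int :=
  match fuel with
  | 0 => result
  | Nat.succ f =>
    if A ≤ C ∧ B ≤ D then
      let result :=
        if C - A = D - B then
          let R := C - A
          let Q := (R >>> P.toNat) +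
                   (PySem.Int.bitCount (PySem.Int.band R (((1 : Int) <<< P.toNat) - 1)) : Int)
          min result (P + Q)
        else result
      solveLoopAlt f (A * 2) (B * 2) C D (P + 1) result
    else result

def solve_alt (A : Int) (B : Int) (C : Int) (D : Int) : Int :=
  let r := solveLoopAlt 128 A B C D 0 (10 ^ 9 + 1)
  if r = 10 ^ 9 + 1 then -1 else r

-- ===== PRECONDITION & SPEC =====
def Spec_solve (A : Int) (B : Int) (C : Int) (D : Int) (out : Int) : Prop := out = solve_alt A B C D
instance (A : Int) (B : Int) (C : Int) (D : Int) (out : Int) : Decidable (Spec_solve A B C D out) := by unfold Spec_solve; infer_instance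

-- ===== CLAIM (what is proved, stated in full; the proofs are below) =====
def Claim_equal_solve : Prop := ∀ (A : Int) (B : Int) (C : Int) (D : Int), Dom_solve A B C D → Spec_solve A B C D (solve A B C D)

-- ===== LEMMAS AND PROOFS =====

-- popcount of a Nat via PySem.Int.bitCount
def pvPc (m : Nat) : Nat := PySem.Int.bitCount (m : Int)

lemma pvPc_zero : pvPc 0 = 0 := by decide

lemma pvPc_rec (m : Nat) (h : 0 < m) : pvPc m = m % 2 + pvPc (m / 2) := by
  simp only [pvPc]
  exact PySem.Int.bitCount_natCast h

-- splitting off the top bit of a (p+1)-bit number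
lemma pvPc_split (p : Nat) : ∀ m : Nat, m < 2 ^ (p + 1) →
    pvPc m = m / 2 ^ p + pvPc (m % 2 ^ p) := by
  induction p with
  | zero =>
    intro m hm
    interval_cases m <;> decide
  | succ p ih =>
    intro m hm
    rcases Nat.eq_zero_or_pos m with h0 | h0
    · simp [h0, pvPc_zero]
    have hpow : (2:Nat) ^ (p + 1 + 1) = 2 * 2 ^ (p + 1) := by ring
    have h2 : m / 2 < 2 ^ (p + 1) := Nat.div_lt_of_lt_mul (by omega)
    have h3 := ih (m / 2) h2
    have e1 : m / 2 / 2 ^ p = m / 2 ^ (p + 1) := by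
      rw [Nat.div_div_eq_div_mul]; congr 1; ring
    have e2 : m / 2 % 2 ^ p = m % 2 ^ (p + 1) / 2 := by
      rw [show (2:Nat) ^ (p + 1) = 2 * 2 ^ p by ring]
      exact (Nat.mod_mul_right_div_self m 2 (2 ^ p)).symm
    have hm2 : m % 2 ^ (p + 1) % 2 = m % 2 :=
      Nat.mod_mod_of_dvd m (dvd_pow_self 2 (Nat.succ_ne_zero p))
    rcases Nat.eq_zero_or_pos (m % 2 ^ (p + 1)) with hz | hz
    · rw [pvPc_rec m h0, h3, e1, e2, hz]
      simp [pvPc_zero]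
      omega
    · rw [pvPc_rec m h0, h3, e1, e2, pvPc_rec _ hz, hm2]
      omega

-- the countdown range [p+1, p, …, 0]
lemma pvRange_down_succ (p : Nat) :
    PySem.List.pyRange ((p : Int) + 1) (-1) (-1) =
      ((p : Int) + 1) :: PySem.List.pyRange (p : Int) (-1) (-1) := by
  rw [PySem.List.pyRange_neg_one_cons (show (-1 : Int) < (p : Int) + 1 by omega)]
  norm_num

-- the inner loop, closed form (generalized over the starting accumulator)
lemma solveInner_fold (p : Nat) : ∀ (q : Int) (r : Nat),
    ((PySem.List.pyRange (p : Int) (-1) (-1)).foldl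
      (fun qr x => (qr.1 + PySem.Int.floordiv qr.2 ((2 : Int) ^ x.toNat),
                    PySem.Int.mod qr.2 ((2 : Int) ^ x.toNat)))
      (q, (r : Int))).1 = q + (r / 2 ^ p : Nat) + (pvPc (r % 2 ^ p) : Int) := by
  induction p with
  | zero =>
    intro q r
    have h0 : PySem.List.pyRange (0 : Int) (-1) (-1) = [0] := by decide
    simp only [Nat.cast_zero]
    rw [h0]
    simp only [List.foldl_cons, List.foldl_nil]
    have : PySem.Int.floordiv (r : Int) ((2:Int) ^ (0:Int).toNat) = ((r / 2 ^ 0 : Nat) : Int) := by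
      simp
    rw [this]
    simp [Nat.mod_one, pvPc_zero]
  | succ p ih =>
    intro q r
    rw [show ((p + 1 : Nat) : Int) = (p : Int) + 1 by push_cast; ring, pvRange_down_succ]
    simp only [List.foldl_cons]
    have ht : ((p : Int) + 1).toNat = p + 1 := by omega
    have hp : ((2 : Int) ^ (p + 1)) = ((2 ^ (p + 1) : Nat) : Int) := by push_cast; ring
    rw [ht, hp, PySem.Int.floordiv_natCast, PySem.Int.mod_natCast,
      ih (q + ((r / 2 ^ (p + 1) : Nat) : Int)) (r % 2 ^ (p + 1))]
    have hlt : r % 2 ^ (p + 1) < 2 ^ (p + 1) := Nat.mod_lt _ (by positivity)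
    have hs := pvPc_split p (r % 2 ^ (p + 1)) hlt
    rw [Nat.mod_mod_of_dvd _ (pow_dvd_pow 2 (Nat.le_succ p))] at hs
    rw [Nat.mod_mod_of_dvd r (pow_dvd_pow 2 (Nat.le_succ p)), hs]
    push_cast
    ring

-- Python's R >> p on a nonnegative R, in Nat terms
lemma shr_natCast (r p : Nat) : ((r : Int) >>> p) = ((r >>> p : Nat) : Int) := by
  simp [Int.shiftRight_eq_div_pow, Nat.shiftRight_eq_div_pow]

-- Python's R & ((1 << p) - 1) on a nonnegative R, in Nat terms
lemma band_mask (r p : Nat) :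
    PySem.Int.band (r : Int) (((1 : Int) <<< p) - 1) = ((r % 2 ^ p : Nat) : Int) := by
  have h1 : ((1 : Int) <<< p) - 1 = ((2 ^ p - 1 : Nat) : Int) := by
    have h2 : ((1 : Int) <<< p) = ((2 ^ p : Nat) : Int) := by
      simp [Int.shiftLeft_eq]
    have h3 : (1:Nat) ≤ 2 ^ p := Nat.one_le_two_pow
    rw [h2]
    push_cast [h3]
    ring
  rw [h1, PySem.Int.band_natCast]
  congr 1
  simp [Nat.and_two_pow_sub_one_eq_mod r p]

-- inner value of A = inner value of B, at any nonnegative R and P = ↑p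
lemma inner_eq (p : Nat) (R : Int) (hR : 0 ≤ R) :
    (solveInner (p : Int) R).1 =
      (R >>> ((p : Int)).toNat) +
        (PySem.Int.bitCount (PySem.Int.band R (((1 : Int) <<< ((p : Int)).toNat) - 1)) : Int) := by
  obtain ⟨r, rfl⟩ : ∃ r : Nat, R = (r : Int) := ⟨R.toNat, (Int.toNat_of_nonneg hR).symm⟩
  rw [solveInner, solveInner_fold p 0 r]
  rw [show ((p : Int)).toNat = p from Int.toNat_natCast p, shr_natCast, band_mask]
  have hb : PySem.Int.bitCount ((r % 2 ^ p : Nat) : Int) = pvPc (r % 2 ^ p) := rfl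
  rw [hb, Nat.shiftRight_eq_div_pow]
  ring

-- the two while-loops agree in lockstep (P is reachable only as a Nat cast)
lemma loop_eq (fuel : Nat) : ∀ (A B C D result : Int) (p : Nat),
    solveLoop fuel A B C D (p : Int) result = solveLoopAlt fuel A B C D (p : Int) result := by
  induction fuel with
  | zero => intro A B C D result p; rfl
  | succ f ih =>
    intro A B C D result p
    rw [solveLoop, solveLoopAlt]
    by_cases hg : A ≤ C ∧ B ≤ D
    · simp only [if_pos hg]
      by_cases hd : C - A = D - B
      · simp only [if_pos hd]
        rw [inner_eq p (C - A) (by omega)]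
        rw [show ((p : Int) + 1) = ((p + 1 : Nat) : Int) by push_cast; ring, ih]
      · simp only [if_neg hd]
        rw [show ((p : Int) + 1) = ((p + 1 : Nat) : Int) by push_cast; ring, ih]
    · simp only [if_neg hg]

-- ===== VERDICT (by name: the statement is the Claim_ definition above) =====
theorem solve_spec : Claim_equal_solve := by
  intro A B C D _
  unfold Spec_solve solve solve_alt pvINF
  rw [show (0 : Int) = ((0 : Nat) : Int) from rfl, loop_eq]
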